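-- pv_equiv track=rewrite | github.com/DA-testa/parallel-processing-Bonqs | main.py | simulate_parallel_processing
-- ===== SOURCE A (Python) =====
-- def simulate_parallel_processing(num_threads, num_jobs, job_times):
--     output = []
--     threads = [0] * num_threads
--     current_job = 0
--     current_time = 0
--     while current_job < num_jobs:
--         for i in range(num_threads):
--             if threads[i] == 0:
--                 threads[i] = job_times[current_job]
--                 output.append((i, current_time))
--                 current_job += 1
--                 if current_job == num_jobs:
--                     break
--
--         for i in range(num_threads):
--             if threads[i] > 0:
--                 threads[i] -= 1
--
--         current_time += 1
--
--     return output
-- ===== SOURCE B (Python) =====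
-- def simulate_parallel_processing(num_threads, num_jobs, job_times):
--     # Event-driven: track each thread's absolute free time; assign each job to the
--     # earliest-free thread (first index on ties) instead of simulating every tick.
--     free = [0] * num_threads
--     output = []
--     for j in range(num_jobs):
--         d = job_times[j]
--         m = min(free)
--         i = free.index(m)
--         output.append((i, m))
--         free[i] = m + (d if d > 1 else 1)
--     return output
-- ===== Notes on version B (the rewrite author's own statement) =====
-- stated objective: alternative
-- what changed: Replaced A's tick-by-tick simulation (scan all threads every time unit, decrement counters) by an event-driven schedule that keeps each thread's absolute free time and assigns each job directly to the earliest-free thread (first index on ties), so B's work is per job rather than per simulated time unit.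
-- outside the precondition, e.g. on simulate_parallel_processing(2, 3, [-1, 5, 7]): A returns [(0, 0), (1, 0), (1, 5)], B returns [(0, 0), (1, 0), (0, 1)]; on simulate_parallel_processing(1, 2, [-1, 3]): A does not finish within the time limit, B returns [(0, 0), (0, 1)]; on simulate_parallel_processing(2, 3, [1, 2]): A raises IndexError, B raises IndexError
import Mathlib
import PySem

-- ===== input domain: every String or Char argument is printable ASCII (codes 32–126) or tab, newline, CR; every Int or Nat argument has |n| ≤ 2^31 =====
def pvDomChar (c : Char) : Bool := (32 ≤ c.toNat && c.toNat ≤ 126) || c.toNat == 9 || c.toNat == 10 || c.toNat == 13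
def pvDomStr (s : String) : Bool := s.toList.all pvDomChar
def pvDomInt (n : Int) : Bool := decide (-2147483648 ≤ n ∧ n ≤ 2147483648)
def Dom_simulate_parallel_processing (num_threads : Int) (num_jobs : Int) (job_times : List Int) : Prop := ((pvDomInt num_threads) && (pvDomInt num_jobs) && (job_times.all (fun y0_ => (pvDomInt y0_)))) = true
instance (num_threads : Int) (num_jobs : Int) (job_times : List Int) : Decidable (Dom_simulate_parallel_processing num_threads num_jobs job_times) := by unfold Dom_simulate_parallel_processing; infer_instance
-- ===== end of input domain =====

-- B replaces A's tick-by-tick thread simulation by an event-driven schedule over absolute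
-- per-thread free times (assign each job to the earliest-free thread, first index on ties).


-- ===== PORT A =====
-- the inner `for i in range(num_threads)` assignment pass, as structural recursion over the
-- thread list (i = running index, j = current_job, t = current_time); `break` returns early
def pvA_assign (jobs : List Int) (nj t : Int) : List Int → Int → Int → List (Int × Int) → (List Int × Int × List (Int × Int))
  | [], _i, j, out => ([], j, out)
  | r :: rest, i, j, out =>
    if r = 0 then
      if j + 1 = nj then (((PySem.List.pyGet? jobs j).getD 0) :: rest, j + 1, out ++ [(i, t)])
      else
        let s := pvA_assign jobs nj t rest (i + 1) (j + 1) (out ++ [(i, t)])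
        (((PySem.List.pyGet? jobs j).getD 0) :: s.1, s.2.1, s.2.2)
    else
      let s := pvA_assign jobs nj t rest (i + 1) j out
      (r :: s.1, s.2.1, s.2.2)

-- the second `for` pass: decrement every positive counter
def pvA_dec (ts : List Int) : List Int := ts.map (fun x => if x > 0 then x - 1 else x)

-- the `while current_job < num_jobs` loop; fuel is only a totality device (within
-- Pre_ the fuel chosen below is proven sufficient)
def pvA_loop (jobs : List Int) (nj : Int) : Nat → List Int → Int → Int → List (Int × Int) → List (Int × Int)
  | 0, _, _, _, out => out
  | Nat.succ fuel, ts, j, t, out =>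
    if j < nj then
      let s := pvA_assign jobs nj t ts 0 j out
      pvA_loop jobs nj fuel (pvA_dec s.1) s.2.1 (t + 1) s.2.2
    else out

def simulate_parallel_processing (num_threads : Int) (num_jobs : Int) (job_times : List Int) : List (Int × Int) :=
  let fuel := ((job_times.take num_jobs.toNat).foldl (fun s d => s + (if d > 1 then d else 1)) 0).toNat + 1
  pvA_loop job_times num_jobs fuel (List.replicate num_threads.toNat 0) 0 0 []

-- ===== PORT B =====
-- event-driven: free[i] = absolute time at which thread i becomes free
def simulate_parallel_processing_alt (num_threads : Int) (num_jobs : Int) (job_times : List Int) : List (Int × Int) :=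
  ((PySem.List.pyRange 0 num_jobs 1).foldl (fun (st : List (Int × Int) × List Int) j =>
      let d := (PySem.List.pyGet? job_times j).getD 0
      let m := (PySem.List.min? st.2 (fun x => x)).getD 0
      let i := (PySem.List.index? st.2 m).getD 0
      (st.1 ++ [((i : Int), m)], st.2.set i (m + (if d > 1 then d else 1)))
    ) ([], List.replicate num_threads.toNat 0)).1

-- ===== PRECONDITION & SPEC =====
-- Pre_ excludes (when jobs are pending) nonpositive num_threads and negative durations among
-- the first num_jobs jobs — A then loops forever, or, where it still returns, permanently
-- blocks the thread that got the negative job (an artefact of its `== 0` free test) — and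
-- num_jobs > len(job_times), where A raises IndexError.
def Pre_simulate_parallel_processing (num_threads : Int) (num_jobs : Int) (job_times : List Int) : Prop :=
  num_jobs ≤ 0 ∨ (1 ≤ num_threads ∧ num_jobs ≤ (job_times.length : Int) ∧
    ∀ d ∈ job_times.take num_jobs.toNat, 0 ≤ d)
instance (num_threads : Int) (num_jobs : Int) (job_times : List Int) : Decidable (Pre_simulate_parallel_processing num_threads num_jobs job_times) := by unfold Pre_simulate_parallel_processing; infer_instance

def pvWitness_simulate_parallel_processing : Int × Int × List Int := (2, 3, [2, 5, 1])

def Spec_simulate_parallel_processing (num_threads : Int) (num_jobs : Int) (job_times : List Int) (out : List (Int × Int)) : Prop := out = simulate_parallel_processing_alt num_threads num_jobs job_times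
instance (num_threads : Int) (num_jobs : Int) (job_times : List Int) (out : List (Int × Int)) : Decidable (Spec_simulate_parallel_processing num_threads num_jobs job_times out) := by unfold Spec_simulate_parallel_processing; infer_instance

-- ===== CLAIM (what is proved, stated in full; the proofs are below) =====
def Claim_equal_simulate_parallel_processing : Prop := ∀ (num_threads : Int) (num_jobs : Int) (job_times : List Int), Dom_simulate_parallel_processing num_threads num_jobs job_times → Pre_simulate_parallel_processing num_threads num_jobs job_times → Spec_simulate_parallel_processing num_threads num_jobs job_times (simulate_parallel_processing num_threads num_jobs job_times)

-- ===== LEMMAS AND PROOFS =====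

-- max(d, 1) for d ≥ 0, as both programs compute it
def pvMaxd (d : Int) : Int := if d > 1 then d else 1

-- the sum of max(d_k,1) over the still-unassigned jobs j, …, nj-1
def pvSRem (jobs : List Int) (nj j : Int) : Int :=
  ((PySem.List.pyRange j nj 1).map (fun k => pvMaxd ((PySem.List.pyGet? jobs k).getD 0))).sum

-- B's remaining computation from job j with free times `free` (proof-side view of the fold)
def pvBrun (jobs : List Int) (nj : Int) (free : List Int) (j : Int) (out : List (Int × Int)) : List (Int × Int) :=
  if _h : j < nj then
    let d := (PySem.List.pyGet? jobs j).getD 0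
    let m := (PySem.List.min? free (fun x => x)).getD 0
    let i := (PySem.List.index? free m).getD 0
    pvBrun jobs nj (free.set i (m + (if d > 1 then d else 1))) (j + 1) (out ++ [((i : Int), m)])
  else out
termination_by (nj - j).toNat
decreasing_by omega

lemma pvMaxd_pos (d : Int) : 1 ≤ pvMaxd d := by
  unfold pvMaxd; split <;> omega

lemma pvSRem_nonneg (jobs : List Int) (nj j : Int) : 0 ≤ pvSRem jobs nj j := by
  unfold pvSRem
  apply List.sum_nonneg
  intro x hx
  simp only [List.mem_map] at hx
  obtain ⟨k, -, rfl⟩ := hx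
  have := pvMaxd_pos ((PySem.List.pyGet? jobs k).getD 0)
  omega

lemma pvSRem_step (jobs : List Int) (nj j : Int) (h : j < nj) :
    pvSRem jobs nj j = pvMaxd ((PySem.List.pyGet? jobs j).getD 0) + pvSRem jobs nj (j + 1) := by
  unfold pvSRem
  rw [PySem.List.pyRange_one_cons h]
  simp

lemma pvSum_ge (t : Int) (l : List Int) (h : ∀ x ∈ l, t ≤ x) : t * (l.length : Int) ≤ l.sum := by
  induction l with
  | nil => simp
  | cons a l ih =>
    have h1 : t ≤ a := h a (List.mem_cons_self)
    have h2 := ih (fun x hx => h x (List.mem_cons_of_mem _ hx))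
    simp only [List.length_cons, List.sum_cons]
    push_cast
    nlinarith

lemma pvSet_append (pre rest : List Int) (x v : Int) :
    (pre ++ x :: rest).set pre.length v = pre ++ v :: rest := by
  induction pre with
  | nil => simp
  | cons a p ih => simp [ih]

lemma pvMin_at (pre rest : List Int) (t : Int)
    (hpre : ∀ x ∈ pre, t < x) (hrest : ∀ x ∈ rest, t ≤ x) :
    (PySem.List.min? (pre ++ t :: rest) (fun x => x)).getD 0 = t ∧
    PySem.List.index? (pre ++ t :: rest) t = some pre.length := by
  constructor
  · cases hmin : PySem.List.min? (pre ++ t :: rest) (fun x => x) with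
    | none =>
      rw [PySem.List.min?_eq_none_iff] at hmin
      simp at hmin
    | some m =>
      have hmem := PySem.List.min?_mem hmin
      have hle := PySem.List.min?_isMin hmin t (by simp)
      simp only [List.mem_append, List.mem_cons] at hmem
      have : m = t := by
        rcases hmem with h1 | h1 | h1
        · exact absurd hle (not_le.mpr (hpre m h1))
        · exact h1
        · exact le_antisymm hle (hrest m h1)
      simp [this]
  · rw [PySem.List.index?_eq_some_iff]
    exact ⟨pre, rest, rfl, rfl, fun h => lt_irrefl t (hpre t h)⟩

lemma pvBrun_done (jobs : List Int) (nj : Int) (free : List Int) (j : Int) (out : List (Int × Int))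
    (h : ¬ j < nj) : pvBrun jobs nj free j out = out := by
  rw [pvBrun]; simp [h]

lemma pvA_loop_done (jobs : List Int) (nj : Int) (fuel : Nat) (ts : List Int) (j t : Int)
    (out : List (Int × Int)) (h : ¬ j < nj) : pvA_loop jobs nj fuel ts j t out = out := by
  cases fuel <;> simp [pvA_loop, h]

-- THE PASS LEMMA: one assignment pass of A over the suffix `suf` of the free-time list
-- (prefix `pre` already scanned, all busy) performs exactly B's next pops.
lemma pvPass (jobs : List Int) (nj t : Int)
    (Hd : ∀ k : Int, 0 ≤ k → k < nj → 0 ≤ (PySem.List.pyGet? jobs k).getD 0) :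
    ∀ (suf pre : List Int) (j : Int) (out : List (Int × Int)),
    (∀ x ∈ pre, t < x) → (∀ x ∈ suf, t ≤ x) → 0 ≤ j → j < nj →
    ∃ fsuf : List Int,
      pvBrun jobs nj (pre ++ fsuf) (pvA_assign jobs nj t (suf.map (· - t)) (pre.length : Int) j out).2.1
          (pvA_assign jobs nj t (suf.map (· - t)) (pre.length : Int) j out).2.2
        = pvBrun jobs nj (pre ++ suf) j out ∧
      j ≤ (pvA_assign jobs nj t (suf.map (· - t)) (pre.length : Int) j out).2.1 ∧
      (pvA_assign jobs nj t (suf.map (· - t)) (pre.length : Int) j out).2.1 ≤ nj ∧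
      fsuf.sum + pvSRem jobs nj (pvA_assign jobs nj t (suf.map (· - t)) (pre.length : Int) j out).2.1
        = suf.sum + pvSRem jobs nj j ∧
      fsuf.length = suf.length ∧
      ((pvA_assign jobs nj t (suf.map (· - t)) (pre.length : Int) j out).2.1 < nj →
        (∀ x ∈ fsuf, t + 1 ≤ x) ∧
        pvA_dec (pvA_assign jobs nj t (suf.map (· - t)) (pre.length : Int) j out).1
          = fsuf.map (· - (t + 1))) := by
  intro suf
  induction suf with
  | nil =>
    intro pre j out hpre hsuf hj0 hjnj
    simp only [List.map_nil, pvA_assign]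
    exact ⟨[], rfl, le_rfl, le_of_lt hjnj, rfl, rfl, fun _ => ⟨by simp, rfl⟩⟩
  | cons f rest ih =>
    intro pre j out hpre hsuf hj0 hjnj
    have hrest : ∀ x ∈ rest, t ≤ x := fun x hx => hsuf x (List.mem_cons_of_mem _ hx)
    have hft : t ≤ f := hsuf f List.mem_cons_self
    simp only [List.map_cons, pvA_assign]
    by_cases hf : f - t = 0
    · -- thread is free: A assigns job j here, exactly B's next pop
      have hfeq : f = t := by omega
      subst hfeq
      have hd0 : 0 ≤ (PySem.List.pyGet? jobs j).getD 0 := Hd j hj0 hjnj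
      obtain ⟨hm, hi⟩ := pvMin_at pre rest f hpre hrest
      have hB : pvBrun jobs nj (pre ++ f :: rest) j out
          = pvBrun jobs nj (pre ++ (f + pvMaxd ((PySem.List.pyGet? jobs j).getD 0)) :: rest)
              (j + 1) (out ++ [((pre.length : Int), f)]) := by
        rw [pvBrun]
        simp only [hjnj, dite_true, hm, hi, Option.getD_some]
        rw [pvSet_append]
        rfl
      rw [if_pos hf]
      by_cases hbreak : j + 1 = nj
      · rw [if_pos hbreak]
        simp only [Prod.snd]
        refine ⟨(f + pvMaxd ((PySem.List.pyGet? jobs j).getD 0)) :: rest, ?_, by omega, by omega,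
          ?_, by simp, fun h => absurd h (by omega)⟩
        · rw [hB, hbreak, pvBrun_done _ _ _ _ _ (lt_irrefl nj)]
        · have hs := pvSRem_step jobs nj j hjnj
          have hmx := pvMaxd_pos ((PySem.List.pyGet? jobs j).getD 0)
          simp only [List.sum_cons]
          rw [hbreak] at hs ⊢
          omega
      · rw [if_neg hbreak]
        simp only [Prod.snd]
        have hjnj' : j + 1 < nj := by omega
        have hlen : (((pre ++ [f + pvMaxd ((PySem.List.pyGet? jobs j).getD 0)]).length : Int))
            = (pre.length : Int) + 1 := by simp
        obtain ⟨fsuf', hB1, hle1, hle2, hsum1, hlen1, hcond1⟩ :=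
          ih (pre ++ [f + pvMaxd ((PySem.List.pyGet? jobs j).getD 0)]) (j + 1)
            (out ++ [((pre.length : Int), f)])
            (by intro x hx
                rcases List.mem_append.mp hx with h1 | h1
                · exact hpre x h1
                · have hmx := pvMaxd_pos ((PySem.List.pyGet? jobs j).getD 0)
                  simp at h1; omega)
            hrest (by omega) hjnj'
        rw [hlen] at hB1 hle1 hle2 hsum1 hcond1
        refine ⟨(f + pvMaxd ((PySem.List.pyGet? jobs j).getD 0)) :: fsuf', ?_, by omega, by omega,
          ?_, by simpa using hlen1, ?_⟩
        · rw [hB]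
          rw [show pre ++ (f + pvMaxd ((PySem.List.pyGet? jobs j).getD 0)) :: fsuf'
              = (pre ++ [f + pvMaxd ((PySem.List.pyGet? jobs j).getD 0)]) ++ fsuf' by simp,
            hB1]
          rw [show (pre ++ [f + pvMaxd ((PySem.List.pyGet? jobs j).getD 0)]) ++ rest
              = pre ++ (f + pvMaxd ((PySem.List.pyGet? jobs j).getD 0)) :: rest by simp]
        · have hs := pvSRem_step jobs nj j hjnj
          simp only [List.sum_cons]
          omega
        · intro hlt
          obtain ⟨hge, hdec⟩ := hcond1 hlt
          constructor
          · intro x hx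
            rcases List.mem_cons.mp hx with h1 | h1
            · have hmx := pvMaxd_pos ((PySem.List.pyGet? jobs j).getD 0)
              omega
            · exact hge x h1
          · simp only [pvA_dec, List.map_cons] at hdec ⊢
            rw [hdec]
            congr 1
            have hmx := pvMaxd_pos ((PySem.List.pyGet? jobs j).getD 0)
            unfold pvMaxd at *
            split_ifs at * <;> omega
    · -- thread is busy: A skips it; its free time stays in the prefix
      have hfgt : t < f := by omega
      rw [if_neg hf]
      simp only [Prod.snd]
      have hlen : (((pre ++ [f]).length : Int)) = (pre.length : Int) + 1 := by simp
      obtain ⟨fsuf', hB1, hle1, hle2, hsum1, hlen1, hcond1⟩ :=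
        ih (pre ++ [f]) j out
          (by intro x hx
              rcases List.mem_append.mp hx with h1 | h1
              · exact hpre x h1
              · simp at h1; omega)
          hrest hj0 hjnj
      rw [hlen] at hB1 hle1 hle2 hsum1 hcond1
      refine ⟨f :: fsuf', ?_, by omega, by omega, ?_, by simpa using hlen1, ?_⟩
      · rw [show pre ++ f :: fsuf' = (pre ++ [f]) ++ fsuf' by simp, hB1,
          show (pre ++ [f]) ++ rest = pre ++ f :: rest by simp]
      · simp only [List.sum_cons]; omega
      · intro hlt
        obtain ⟨hge, hdec⟩ := hcond1 hlt
        refine ⟨?_, ?_⟩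
        · intro x hx
          rcases List.mem_cons.mp hx with h1 | h1
          · omega
          · exact hge x h1
        · simp only [pvA_dec, List.map_cons] at hdec ⊢
          rw [hdec]
          congr 1
          split_ifs <;> omega

-- THE MAIN INVARIANT: A's while-loop from a state (free times `free`, time t, job j)
-- computes exactly B's remaining schedule, provided the fuel exceeds the potential
-- Σ(free - t) + Σ max(d,1) over the remaining jobs.
lemma pvMain (jobs : List Int) (nj : Int)
    (Hd : ∀ k : Int, 0 ≤ k → k < nj → 0 ≤ (PySem.List.pyGet? jobs k).getD 0) :
    ∀ (fuel : Nat) (free : List Int) (t j : Int) (out : List (Int × Int)),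
    free ≠ [] → (∀ x ∈ free, t ≤ x) → 0 ≤ j →
    free.sum - t * (free.length : Int) + pvSRem jobs nj j < (fuel : Int) →
    pvA_loop jobs nj fuel (free.map (· - t)) j t out = pvBrun jobs nj free j out := by
  intro fuel
  induction fuel with
  | zero =>
    intro free t j out hne hfree hj0 hfuel
    by_cases hj : j < nj
    · exfalso
      have h1 := pvSum_ge t free hfree
      have h2 := pvSRem_nonneg jobs nj j
      simp only [Nat.cast_zero] at hfuel
      omega
    · rw [pvBrun_done _ _ _ _ _ hj]; rfl
  | succ fuel ih =>
    intro free t j out hne hfree hj0 hfuel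
    by_cases hj : j < nj
    · simp only [pvA_loop, if_pos hj]
      have hPass := pvPass jobs nj t Hd free [] j out (by simp) hfree hj0 hj
      simp only [List.nil_append, List.length_nil, Nat.cast_zero] at hPass
      obtain ⟨fsuf, hB1, hle1, hle2, hsum1, hlen1, hcond⟩ := hPass
      by_cases hdone : (pvA_assign jobs nj t (free.map (· - t)) 0 j out).2.1 < nj
      · obtain ⟨hge, hdec⟩ := hcond hdone
        rw [hdec]
        have hlenpos : 1 ≤ (free.length : Int) := by
          have : free.length ≠ 0 := fun h => hne (List.eq_nil_of_length_eq_zero h)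
          omega
        have hmul : (t + 1) * (fsuf.length : Int) = t * (free.length : Int) + (free.length : Int) := by
          rw [hlen1]; ring
        have hΦ : fsuf.sum - (t + 1) * (fsuf.length : Int)
            + pvSRem jobs nj (pvA_assign jobs nj t (free.map (· - t)) 0 j out).2.1 < (fuel : Int) := by
          push_cast at hfuel
          linarith
        rw [ih fsuf (t + 1) _ _ (by intro h; subst h; simp at hlen1
                                    exact hne (List.eq_nil_of_length_eq_zero hlen1.symm))
            hge (by omega) hΦ]
        exact hB1
      · rw [pvA_loop_done _ _ _ _ _ _ _ hdone, ← hB1, pvBrun_done _ _ _ _ _ hdone]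
    · rw [pvA_loop_done _ _ _ _ _ _ _ hj, pvBrun_done _ _ _ _ _ hj]

-- bridge: B's port fold equals pvBrun
lemma pvFold_eq_pvBrun (jobs : List Int) (nj : Int) :
    ∀ (j : Int) (free : List Int) (out : List (Int × Int)),
    ((PySem.List.pyRange j nj 1).foldl (fun (st : List (Int × Int) × List Int) k =>
      let d := (PySem.List.pyGet? jobs k).getD 0
      let m := (PySem.List.min? st.2 (fun x => x)).getD 0
      let i := (PySem.List.index? st.2 m).getD 0
      (st.1 ++ [((i : Int), m)], st.2.set i (m + (if d > 1 then d else 1)))) (out, free)).1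
    = pvBrun jobs nj free j out := by
  have main : ∀ (n : Nat) (j : Int) (free : List Int) (out : List (Int × Int)),
      (nj - j).toNat ≤ n →
      ((PySem.List.pyRange j nj 1).foldl (fun (st : List (Int × Int) × List Int) k =>
        let d := (PySem.List.pyGet? jobs k).getD 0
        let m := (PySem.List.min? st.2 (fun x => x)).getD 0
        let i := (PySem.List.index? st.2 m).getD 0
        (st.1 ++ [((i : Int), m)], st.2.set i (m + (if d > 1 then d else 1)))) (out, free)).1
      = pvBrun jobs nj free j out := by
    intro n
    induction n with
    | zero =>
      intro j free out hn
      have hj : ¬ j < nj := by omega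
      rw [PySem.List.pyRange_one_eq_nil (by omega), pvBrun_done jobs nj free j out hj]
      rfl
    | succ n ih =>
      intro j free out hn
      by_cases hj : j < nj
      · rw [PySem.List.pyRange_one_cons hj, List.foldl_cons, pvBrun]
        simp only [hj, dite_true]
        exact ih (j + 1) _ _ (by omega)
      · rw [PySem.List.pyRange_one_eq_nil (by omega), pvBrun_done jobs nj free j out hj]
        rfl
  intro j free out
  exact main (nj - j).toNat j free out le_rfl

lemma pvSRem_eq_fold (jobs : List Int) :
    ∀ (n : Nat), n ≤ jobs.length →
    pvSRem jobs (n : Int) 0 = (jobs.take n).foldl (fun s d => s + (if d > 1 then d else 1)) 0 := by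
  have hfold : ∀ (l : List Int) (a : Int),
      l.foldl (fun s d => s + (if d > 1 then d else 1)) a = a + (l.map pvMaxd).sum := by
    intro l
    induction l with
    | nil => simp
    | cons b l ih => intro a; simp only [List.foldl_cons, List.map_cons, List.sum_cons, ih]
                     unfold pvMaxd; ring
  have key : ∀ (n : Nat), n ≤ jobs.length →
      ((PySem.List.pyRange 0 (n : Int) 1).map (fun k => pvMaxd ((PySem.List.pyGet? jobs k).getD 0)))
        = (jobs.take n).map pvMaxd := by
    intro n
    induction n with
    | zero => simp
    | succ n ih =>
      intro hn
      have hn' : n ≤ jobs.length := by omega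
      have hlt : n < jobs.length := by omega
      have hcast : ((n + 1 : Nat) : Int) = ((n : Int) + 1) := by push_cast; ring
      rw [hcast, PySem.List.pyRange_one_succ_right (by positivity), List.map_append, ih hn',
        List.take_add_one]
      simp [List.getElem?_eq_getElem hlt]
      rw [List.take_add_one]
      simp [List.getElem?_map, List.getElem?_eq_getElem hlt]
  intro n hn
  rw [hfold]
  unfold pvSRem
  rw [key n hn]
  ring

-- ===== VERDICT (by name: the statement is the Claim_ definition above) =====
theorem simulate_parallel_processing_spec : Claim_equal_simulate_parallel_processing := by
  intro nt nj jobs _hdom hpre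
  unfold Spec_simulate_parallel_processing
  unfold simulate_parallel_processing simulate_parallel_processing_alt
  by_cases hnj : nj ≤ 0
  · rw [pvA_loop_done _ _ _ _ _ _ _ (by omega : ¬ (0 : Int) < nj),
      PySem.List.pyRange_one_eq_nil (by omega)]
    rfl
  · have hpre' : 1 ≤ nt ∧ nj ≤ (jobs.length : Int) ∧ ∀ d ∈ jobs.take nj.toNat, 0 ≤ d := by
      rcases hpre with h | h
      · omega
      · exact h
    obtain ⟨hnt, hlen, hnn⟩ := hpre'
    have Hd : ∀ k : Int, 0 ≤ k → k < nj → 0 ≤ (PySem.List.pyGet? jobs k).getD 0 := by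
      intro k hk0 hkn
      have hk : k.toNat < jobs.length := by omega
      have hk2 : k.toNat < nj.toNat := by omega
      rw [PySem.List.pyGet?_of_nonneg jobs hk0, List.getElem?_eq_getElem hk, Option.getD_some]
      apply hnn
      have hb : k.toNat < (jobs.take nj.toNat).length := by
        simp [List.length_take]; omega
      have := List.getElem_take (xs := jobs) (j := nj.toNat) (i := k.toNat) (h := hb)
      rw [← this]
      exact List.getElem_mem hb
    rw [pvFold_eq_pvBrun]
    have hS := pvSRem_eq_fold jobs nj.toNat (by omega)
    rw [Int.toNat_of_nonneg (by omega : (0:Int) ≤ nj)] at hS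
    have hS0 := pvSRem_nonneg jobs nj 0
    have hF0 : 0 ≤ (jobs.take nj.toNat).foldl (fun s d => s + (if d > 1 then d else 1)) 0 := by
      rw [← hS]; exact hS0
    have hΦ : (List.replicate nt.toNat (0:Int)).sum
        - 0 * ((List.replicate nt.toNat (0:Int)).length : Int) + pvSRem jobs nj 0
        < ((((jobs.take nj.toNat).foldl (fun s d => s + (if d > 1 then d else 1)) 0).toNat + 1 : Nat) : Int) := by
      have hsum0 : (List.replicate nt.toNat (0 : Int)).sum = 0 := by simp
      rw [hsum0, hS]
      push_cast [Int.toNat_of_nonneg hF0]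
      omega
    have hmap : List.replicate nt.toNat (0 : Int)
        = (List.replicate nt.toNat (0 : Int)).map (· - 0) := by simp
    rw [hmap, pvMain jobs nj Hd _ (List.replicate nt.toNat 0) 0 0 []
      (by simp only [ne_eq, List.replicate_eq_nil_iff]; omega)
      (by intro x hx; rw [List.eq_of_mem_replicate hx])
      le_rfl hΦ]
    rw [← hmap]
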